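-- pv_equiv track=rewrite | github.com/MrHamdulay/csc3-capstone | examples/data/Assignment_4/mggdac001/ndom.py | ndom_add
-- ===== SOURCE A (Python) =====
-- def ndom_add (a, b):
--     x = len(str(a))
--     a0 = 1
--     b0 = 0
--     for i in range(x):
--         a1 = int(str(a)[i]) * 6**(x-a0)
--         a0 = a0+1
--         b0 = b0+a1
--
--     x = len(str(b))
--     a00 = 1
--     b00 = 0
--     for i in range(x):
--         a1 = int(str(b)[i]) * 6**(x-a00)
--         a00 = a00+1
--         b00 = b00+a1
--     return b0+b00
-- ===== SOURCE B (Python) =====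
-- def ndom_add(a, b):
--     def to6(n):
--         r = 0
--         for ch in str(n):
--             r = r * 6 + int(ch)
--         return r
--     return to6(a) + to6(b)
-- ===== Notes on version B (the rewrite author's own statement) =====
-- stated objective: simpler
-- what changed: One shared Horner-accumulator helper (r = r*6 + digit per character) replaces the two positional loops that recompute 6**(x-counter) with explicit position counters and string re-indexing.
import Mathlib
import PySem

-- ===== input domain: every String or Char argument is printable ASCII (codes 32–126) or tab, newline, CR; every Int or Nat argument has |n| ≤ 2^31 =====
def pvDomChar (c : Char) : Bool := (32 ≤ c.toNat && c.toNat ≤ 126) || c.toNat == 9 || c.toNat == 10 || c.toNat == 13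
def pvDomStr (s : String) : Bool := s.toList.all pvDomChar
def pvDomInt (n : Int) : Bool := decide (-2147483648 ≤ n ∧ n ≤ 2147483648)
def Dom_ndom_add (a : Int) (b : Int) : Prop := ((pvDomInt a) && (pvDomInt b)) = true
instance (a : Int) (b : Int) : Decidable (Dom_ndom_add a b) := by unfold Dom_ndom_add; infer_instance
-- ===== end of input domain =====

-- B replaces A's two positional power-summation loops by one Horner-accumulator helper (simpler).
-- int(ch) on a single character: exact for digit characters '0'..'9', the only ones reached
-- inside Pre_ndom_add (str of a nonnegative int); on '-' Python raises, excluded by Pre_.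
def pvDigit (c : Char) : Int := (c.toNat : Int) - 48

-- ===== PORT A =====
def ndom_add (a : Int) (b : Int) : Int :=
  let sa := (PySem.Int.toStr a).toList
  let x : Int := sa.length
  -- str(a)[i]: index i ∈ range(x) is always in range, so pyGetD equals Python's s[i] here
  let pa := (PySem.List.pyRange 0 x 1).foldl
    (fun (st : Int × Int) i =>
      let a1 := pvDigit (PySem.List.pyGetD sa i '0') * 6 ^ ((x - st.1).toNat)
      (st.1 + 1, st.2 + a1)) (1, 0)
  let sb := (PySem.Int.toStr b).toList
  let y : Int := sb.length
  let pb := (PySem.List.pyRange 0 y 1).foldl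
    (fun (st : Int × Int) i =>
      let a1 := pvDigit (PySem.List.pyGetD sb i '0') * 6 ^ ((y - st.1).toNat)
      (st.1 + 1, st.2 + a1)) (1, 0)
  pa.2 + pb.2

-- ===== PORT B =====
def pvTo6 (n : Int) : Int :=
  (PySem.Int.toStr n).toList.foldl (fun r c => r * 6 + pvDigit c) 0

def ndom_add_alt (a : Int) (b : Int) : Int :=
  pvTo6 a + pvTo6 b

-- ===== PRECONDITION & SPEC =====
-- Pre_ excludes negative arguments: there str(n) starts with '-' and int('-') raises ValueError in A (and in B).
def Pre_ndom_add (a : Int) (b : Int) : Prop := 0 ≤ a ∧ 0 ≤ b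
instance (a : Int) (b : Int) : Decidable (Pre_ndom_add a b) := by unfold Pre_ndom_add; infer_instance
def pvWitness_ndom_add : Int × Int := (15, 23)

def Spec_ndom_add (a : Int) (b : Int) (out : Int) : Prop := out = ndom_add_alt a b
instance (a : Int) (b : Int) (out : Int) : Decidable (Spec_ndom_add a b out) := by unfold Spec_ndom_add; infer_instance

-- ===== CLAIM (what is proved, stated in full; the proofs are below) =====
def Claim_equal_ndom_add : Prop := ∀ (a : Int) (b : Int), Dom_ndom_add a b → Pre_ndom_add a b → Spec_ndom_add a b (ndom_add a b)

-- ===== LEMMAS AND PROOFS =====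

-- positional value of a digit-character list: Σ digit(cᵢ) · 6^(len-1-i)
def pvVal : List Char → Int
  | [] => 0
  | c :: t => pvDigit c * 6 ^ t.length + pvVal t

lemma pvHorner_eq (t : List Char) : ∀ (r : Int),
    t.foldl (fun r c => r * 6 + pvDigit c) r = r * 6 ^ t.length + pvVal t := by
  induction t with
  | nil => intro r; simp [pvVal]
  | cons c t ih =>
      intro r
      simp only [List.foldl_cons, ih, pvVal, List.length_cons, pow_succ]
      ring

lemma pvAloop_eq (t : List Char) : ∀ (x a0 b0 : Int), x - a0 + 1 = (t.length : Int) →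
    (t.foldl (fun (st : Int × Int) c => (st.1 + 1, st.2 + pvDigit c * 6 ^ ((x - st.1).toNat))) (a0, b0)).2
      = b0 + pvVal t := by
  induction t with
  | nil => intro x a0 b0 _; simp [pvVal]
  | cons c t ih =>
      intro x a0 b0 h
      simp only [List.length_cons, Nat.cast_add, Nat.cast_one] at h
      have hx : x - a0 = (t.length : Int) := by omega
      simp only [List.foldl_cons]
      rw [ih x (a0 + 1) _ (by omega)]
      have : (x - a0).toNat = t.length := by omega
      simp [pvVal, this]
      ring

lemma pvNum_eq (n : Int) :
    (let s := (PySem.Int.toStr n).toList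
     let x : Int := s.length
     ((PySem.List.pyRange 0 x 1).foldl
        (fun (st : Int × Int) i =>
          (st.1 + 1, st.2 + pvDigit (PySem.List.pyGetD s i '0') * 6 ^ ((x - st.1).toNat))) (1, 0)).2)
      = pvTo6 n := by
  simp only []
  rw [PySem.List.foldl_pyRange_zero_pyGetD' ((PySem.Int.toStr n).toList) '0'
      (fun (st : Int × Int) c => (st.1 + 1, st.2 + pvDigit c * 6 ^ ((((PySem.Int.toStr n).toList.length : Int) - st.1).toNat))) (1, 0)]
  rw [pvAloop_eq _ _ 1 0 (by omega)]
  rw [pvTo6, pvHorner_eq]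
  simp

-- ===== VERDICT (by name: the statement is the Claim_ definition above) =====
theorem ndom_add_spec : Claim_equal_ndom_add := by
  intro a b _ _
  show ndom_add a b = ndom_add_alt a b
  unfold ndom_add ndom_add_alt
  rw [← pvNum_eq a, ← pvNum_eq b]
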